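-- pv_equiv track=rewrite | github.com/robinrob/python | practice/hackerrank/between_two_sets/between_two_sets.py | get_num_between
-- ===== SOURCE A (Python) =====
-- def get_num_between(arr1, arr2):
--     nums_between = []
--     num = 1
--     while num < max(arr2):
--         if (len([e for e in arr1 if num % e == 0]) == len(arr1)) and (len([e for e in arr2 if e % num == 0]) == len(arr2)):
--             nums_between.append(num)
--
--         num += 1
--
--     return len(nums_between)
-- ===== SOURCE B (Python) =====
-- def _gcd(a, b):
--     while b:
--         a, b = b, a % b
--     return a
--
--
-- def get_num_between(arr1, arr2):
--     m = max(arr2)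
--     if m <= 1:
--         return 0
--     if 0 in arr1:
--         return 0  # 0 divides no positive number, so no candidate qualifies (A raises here)
--     lcm = 1
--     for e in arr1:
--         a = -e if e < 0 else e
--         lcm = lcm // _gcd(lcm, a) * a
--     g = 0
--     for e in arr2:
--         g = _gcd(g, -e if e < 0 else e)
--     count = 0
--     for n in range(lcm, m, lcm):
--         if g % n == 0:
--             count += 1
--     return count
-- ===== Notes on version B (the rewrite author's own statement) =====
-- stated objective: faster
-- what changed: Instead of testing every integer below max(arr2) against both whole lists, B computes lcm(arr1) and gcd(arr2) once and only scans the multiples of the lcm below max(arr2), counting those that divide the gcd.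
import Mathlib
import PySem

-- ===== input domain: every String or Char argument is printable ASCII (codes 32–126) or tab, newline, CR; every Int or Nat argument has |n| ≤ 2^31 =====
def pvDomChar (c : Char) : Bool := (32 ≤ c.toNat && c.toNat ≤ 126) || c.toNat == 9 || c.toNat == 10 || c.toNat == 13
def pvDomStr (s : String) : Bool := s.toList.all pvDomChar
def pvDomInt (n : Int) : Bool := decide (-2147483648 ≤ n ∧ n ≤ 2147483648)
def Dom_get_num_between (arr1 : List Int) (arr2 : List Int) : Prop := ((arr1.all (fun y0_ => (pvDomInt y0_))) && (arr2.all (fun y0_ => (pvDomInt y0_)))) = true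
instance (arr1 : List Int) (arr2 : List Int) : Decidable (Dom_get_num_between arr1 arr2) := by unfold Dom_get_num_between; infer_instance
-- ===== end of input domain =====

-- B replaces A's scan of every integer below max(arr2) by lcm(arr1)/gcd(arr2) and a scan of
-- the multiples of the lcm only (objective: faster).

-- ===== PORT A =====
def get_num_between (arr1 : List Int) (arr2 : List Int) : Int :=
  match PySem.List.max? arr2 (fun y => y) with
  | none => 0  -- max([]) raises ValueError; excluded by Pre_
  | some m =>
    let nums : List Int :=
      (PySem.List.pyRange 1 m 1).foldl
        (fun acc num =>
          if ((arr1.filter (fun e => PySem.Int.mod num e == 0)).length == arr1.length)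
             && ((arr2.filter (fun e => PySem.Int.mod e num == 0)).length == arr2.length)
          then acc ++ [num] else acc) []
    (nums.length : Int)

-- ===== PORT B =====
-- helper: Source B's hand-written Euclidean _gcd (while b: a, b = b, a % b)
def egcd (a b : Int) : Int :=
  if h : b = 0 then a else egcd b (PySem.Int.mod a b)
termination_by b.natAbs
decreasing_by
  rcases lt_or_gt_of_ne h with hb | hb
  · have h1 := PySem.Int.mod_neg_bounds a hb
    omega
  · have h1 := PySem.Int.mod_nonneg a hb
    have h2 := PySem.Int.mod_lt a hb
    omega

def get_num_between_alt (arr1 : List Int) (arr2 : List Int) : Int :=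
  match PySem.List.max? arr2 (fun y => y) with
  | none => 0  -- max([]) raises ValueError in B as well; excluded by Pre_
  | some m =>
    if m ≤ 1 then 0
    else if arr1.contains (0 : Int) then 0
    else
      let lcm : Int := arr1.foldl
        (fun l e => PySem.Int.floordiv l (egcd l (if e < 0 then -e else e)) * (if e < 0 then -e else e)) 1
      let g : Int := arr2.foldl (fun g e => egcd g (if e < 0 then -e else e)) 0
      (PySem.List.pyRange lcm m lcm).foldl (fun c n => if PySem.Int.mod g n == 0 then c + 1 else c) 0

-- ===== PRECONDITION & SPEC =====
-- Pre_ excludes exactly the inputs where A raises: arr2 = [] (max of empty → ValueError) and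
-- 0 ∈ arr1 while max(arr2) > 1 (the loop body computes num % 0 → ZeroDivisionError).
def Pre_get_num_between (arr1 : List Int) (arr2 : List Int) : Prop :=
  arr2 ≠ [] ∧ ((0:Int) ∉ arr1 ∨ ∀ e ∈ arr2, e ≤ 1)
instance (arr1 : List Int) (arr2 : List Int) : Decidable (Pre_get_num_between arr1 arr2) := by
  unfold Pre_get_num_between; infer_instance

def pvWitness_get_num_between : List Int × List Int := ([2], [4, 8])

def Spec_get_num_between (arr1 : List Int) (arr2 : List Int) (out : Int) : Prop := out = get_num_between_alt arr1 arr2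
instance (arr1 : List Int) (arr2 : List Int) (out : Int) : Decidable (Spec_get_num_between arr1 arr2 out) := by unfold Spec_get_num_between; infer_instance

-- ===== CLAIM (what is proved, stated in full; the proofs are below) =====
def Claim_equal_get_num_between : Prop := ∀ (arr1 : List Int) (arr2 : List Int), Dom_get_num_between arr1 arr2 → Pre_get_num_between arr1 arr2 → Spec_get_num_between arr1 arr2 (get_num_between arr1 arr2)

-- ===== LEMMAS AND PROOFS =====

theorem abs_port (e : Int) : (if e < 0 then -e else e) = (e.natAbs : Int) := by
  split_ifs <;> omega

theorem egcd_eq_gcd_aux : ∀ (n : Nat) (a b : Int), b.natAbs ≤ n → 0 ≤ a → 0 ≤ b →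
    egcd a b = (Int.gcd a b : Int) := by
  intro n
  induction n with
  | zero =>
    intro a b hle ha hb
    have hb0 : b = 0 := by omega
    subst hb0
    have h1 : egcd a 0 = a := by rw [egcd]; simp
    rw [h1, Int.gcd_zero_right]
    omega
  | succ n ih =>
    intro a b hle ha hb
    by_cases h : b = 0
    · subst h
      have h1 : egcd a 0 = a := by rw [egcd]; simp
      rw [h1, Int.gcd_zero_right]
      omega
    · have hbpos : 0 < b := lt_of_le_of_ne hb (Ne.symm h)
      rw [egcd, dif_neg h]
      have hmod := PySem.Int.mod_nonneg a hbpos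
      have hmlt := PySem.Int.mod_lt a hbpos
      rw [ih b (PySem.Int.mod a b) (by omega) hb hmod]
      congr 1
      rw [PySem.Int.mod_eq_emod_of_pos hbpos]
      have hmodcast : a % b = ((a.natAbs % b.natAbs : Nat) : Int) := by
        rw [Int.natCast_mod]
        congr 1 <;> omega
      unfold Int.gcd
      rw [hmodcast]
      simp only [Int.natAbs_natCast]
      rw [Nat.gcd_comm a.natAbs, Nat.gcd_rec b.natAbs a.natAbs, Nat.gcd_comm]

theorem egcd_eq_gcd (a b : Int) (ha : 0 ≤ a) (hb : 0 ≤ b) : egcd a b = (Int.gcd a b : Int) :=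
  egcd_eq_gcd_aux b.natAbs a b le_rfl ha hb

theorem div_gcd_mul (a b : Nat) (ha : 0 < a) : a / Nat.gcd a b * b = Nat.lcm a b := by
  rw [Nat.lcm]
  set g := Nat.gcd a b with hg
  have hgpos : 0 < g := Nat.gcd_pos_of_pos_left _ ha
  obtain ⟨t, ht⟩ : g ∣ a := Nat.gcd_dvd_left a b
  rw [ht, Nat.mul_div_cancel_left t hgpos, Nat.mul_assoc, Nat.mul_div_cancel_left _ hgpos]

theorem foldl_lcm_fold (l : List Int) (h0 : (0:Int) ∉ l) : ∀ (acc : Nat), 0 < acc →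
    l.foldl (fun L e => PySem.Int.floordiv L (egcd L (if e < 0 then -e else e)) * (if e < 0 then -e else e)) (acc : Int)
      = ((l.foldl (fun A e => Nat.lcm A e.natAbs) acc : Nat) : Int) := by
  induction l with
  | nil => intro acc _; rfl
  | cons e t ih =>
    intro acc hacc
    have he : e ≠ 0 := fun h => h0 (by simp [h])
    have hen : 0 < e.natAbs := by omega
    simp only [List.foldl_cons]
    rw [abs_port e]
    have hgcd : egcd (acc : Int) (e.natAbs : Int) = (Nat.gcd acc e.natAbs : Int) := by
      rw [egcd_eq_gcd _ _ (by positivity) (by positivity), Int.gcd_natCast_natCast]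
    have hgpos : 0 < Nat.gcd acc e.natAbs := Nat.gcd_pos_of_pos_left _ hacc
    rw [hgcd, PySem.Int.floordiv_eq_ediv_of_pos (by exact_mod_cast hgpos)]
    rw [← Int.natCast_div, ← Int.natCast_mul, div_gcd_mul acc e.natAbs hacc]
    rw [ih (fun h => h0 (List.mem_cons_of_mem _ h)) _ (Nat.lcm_pos hacc hen)]

theorem foldl_gcd_fold (l : List Int) : ∀ (acc : Nat),
    l.foldl (fun g e => egcd g (if e < 0 then -e else e)) (acc : Int)
      = ((l.foldl (fun A e => Nat.gcd A e.natAbs) acc : Nat) : Int) := by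
  induction l with
  | nil => intro acc; rfl
  | cons e t ih =>
    intro acc
    simp only [List.foldl_cons]
    rw [abs_port e, egcd_eq_gcd _ _ (by positivity) (by positivity), Int.gcd_natCast_natCast, ih]

theorem lcm_fold_pos (l : List Int) (h0 : (0:Int) ∉ l) : ∀ (acc : Nat), 0 < acc →
    0 < l.foldl (fun A e => Nat.lcm A e.natAbs) acc := by
  induction l with
  | nil => intro acc hacc; exact hacc
  | cons e t ih =>
    intro acc hacc
    have he : e ≠ 0 := fun h => h0 (by simp [h])
    exact ih (fun h => h0 (List.mem_cons_of_mem _ h)) _ (Nat.lcm_pos hacc (by omega))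

theorem forall_dvd_iff_lcm (l : List Int) (n : Int) : ∀ (acc : Nat),
    ((l.foldl (fun A e => Nat.lcm A e.natAbs) acc : Nat) : Int) ∣ n ↔ ((acc : Nat) : Int) ∣ n ∧ ∀ e ∈ l, e ∣ n := by
  induction l with
  | nil => intro acc; simp
  | cons e t ih =>
    intro acc
    simp only [List.foldl_cons, List.forall_mem_cons]
    rw [ih]
    have h1 : ((Nat.lcm acc e.natAbs : Nat) : Int) ∣ n ↔ ((acc : Nat) : Int) ∣ n ∧ e ∣ n := by
      rw [Int.natCast_dvd, Nat.lcm_dvd_iff, ← Int.natCast_dvd, ← Int.natAbs_dvd_natAbs]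
      simp
    rw [h1]
    tauto

theorem dvd_forall_iff_gcd (l : List Int) (n : Int) : ∀ (acc : Nat),
    n ∣ ((l.foldl (fun A e => Nat.gcd A e.natAbs) acc : Nat) : Int) ↔ n ∣ ((acc : Nat) : Int) ∧ ∀ e ∈ l, n ∣ e := by
  induction l with
  | nil => intro acc; simp
  | cons e t ih =>
    intro acc
    simp only [List.foldl_cons, List.forall_mem_cons]
    rw [ih]
    have h1 : n ∣ ((Nat.gcd acc e.natAbs : Nat) : Int) ↔ n ∣ ((acc : Nat) : Int) ∧ n ∣ e := by
      rw [← Int.natAbs_dvd_natAbs, Int.natAbs_natCast, Nat.dvd_gcd_iff]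
      constructor
      · rintro ⟨ha, hb⟩
        exact ⟨by rwa [← Int.natAbs_dvd_natAbs, Int.natAbs_natCast], by rwa [← Int.natAbs_dvd_natAbs]⟩
      · rintro ⟨ha, hb⟩
        exact ⟨by rwa [← Int.natAbs_dvd_natAbs, Int.natAbs_natCast] at ha, by rwa [← Int.natAbs_dvd_natAbs] at hb⟩
    rw [h1]
    tauto

theorem count_mult (Lp G : Nat) (M : Nat) :
    (List.range M).countP (fun k => decide (Lp ∣ (k+1)) && decide ((k+1) ∣ G))
      = (List.range (M / Lp)).countP (fun k => decide (Lp * (k+1) ∣ G)) := by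
  induction M with
  | zero => simp
  | succ M ih =>
    rw [List.range_succ, List.countP_append, ih, Nat.succ_div]
    by_cases hd : Lp ∣ (M+1)
    · rw [if_pos hd, List.range_succ, List.countP_append]
      have hdiv : (M+1)/Lp = M/Lp + 1 := by rw [Nat.succ_div, if_pos hd]
      have hmul : Lp * (M / Lp + 1) = M + 1 := by
        have h2 := Nat.div_mul_cancel hd
        calc Lp * (M/Lp + 1) = (M+1)/Lp * Lp := by rw [← hdiv]; ring
          _ = M+1 := h2
      simp [hmul, hd]
    · rw [if_neg hd]
      simp [hd]

-- ===== VERDICT (by name: the statement is the Claim_ definition above) =====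
theorem get_num_between_spec : Claim_equal_get_num_between := by
  intro arr1 arr2 _ hpre
  unfold Spec_get_num_between
  obtain ⟨hne, hz⟩ := hpre
  cases hmax : PySem.List.max? arr2 (fun y => y) with
  | none => simp [get_num_between, get_num_between_alt, hmax]
  | some m =>
    by_cases hm : m ≤ 1
    · simp [get_num_between, get_num_between_alt, hmax,
        PySem.List.pyRange_one_eq_nil (show m ≤ 1 from hm), hm]
    · have hm1 : 1 < m := by omega
      have h0 : (0:Int) ∉ arr1 := by
        rcases hz with h | h
        · exact h
        · exact absurd (h m (PySem.List.max?_mem hmax)) (by omega)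
      set Lp : Nat := arr1.foldl (fun A e => Nat.lcm A e.natAbs) 1 with hLpdef
      set Gn : Nat := arr2.foldl (fun A e => Nat.gcd A e.natAbs) 0 with hGndef
      have hLp : 0 < Lp := lcm_fold_pos arr1 h0 1 one_pos
      have hcont : arr1.contains (0:Int) = false := by
        simp only [List.contains_eq_mem]
        simpa using h0
      -- ---- evaluate B ----
      have hB : get_num_between_alt arr1 arr2
          = ((PySem.List.pyRange (Lp : Int) m (Lp : Int)).countP
              (fun n => PySem.Int.mod (Gn : Int) n == 0) : Int) := by
        simp only [get_num_between_alt, hmax, if_neg hm, hcont, Bool.false_eq_true, if_false]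
        have hfold1 : List.foldl (fun l e => PySem.Int.floordiv l (egcd l (if e < 0 then -e else e)) * (if e < 0 then -e else e)) (1:Int) arr1 = ((Lp : Nat) : Int) := by
          rw [show (1:Int) = ((1:Nat):Int) from rfl]
          exact foldl_lcm_fold arr1 h0 1 one_pos
        have hfold2 : List.foldl (fun g e => egcd g (if e < 0 then -e else e)) (0:Int) arr2 = ((Gn : Nat) : Int) := by
          rw [show (0:Int) = ((0:Nat):Int) from rfl]
          exact foldl_gcd_fold arr2 0
        rw [hfold1, hfold2, PySem.List.foldl_if_add_one (fun n => PySem.Int.mod (Gn : Int) n == 0)]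
        simp
      -- ---- evaluate A ----
      have hA : get_num_between arr1 arr2
          = ((PySem.List.pyRange 1 m 1).countP
              (fun num => ((arr1.filter (fun e => PySem.Int.mod num e == 0)).length == arr1.length)
                && ((arr2.filter (fun e => PySem.Int.mod e num == 0)).length == arr2.length)) : Int) := by
        simp only [get_num_between, hmax]
        rw [PySem.List.foldl_append_if_eq_filter]
        simp [← List.countP_eq_length_filter]
      rw [hA, hB]
      -- ---- A's predicate is (Lp ∣ n) && (n ∣ Gn) ----
      have hApred : (PySem.List.pyRange 1 m 1).countP
              (fun num => ((arr1.filter (fun e => PySem.Int.mod num e == 0)).length == arr1.length)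
                && ((arr2.filter (fun e => PySem.Int.mod e num == 0)).length == arr2.length))
          = (PySem.List.pyRange 1 m 1).countP
              (fun n => decide ((Lp : Int) ∣ n) && decide (n ∣ (Gn : Int))) := by
        apply List.countP_congr
        intro n _
        have h1 : ((arr1.filter (fun e => PySem.Int.mod n e == 0)).length == arr1.length) = true
            ↔ ((Lp : Int) ∣ n) := by
          simp only [beq_iff_eq, List.length_filter_eq_length_iff, beq_iff_eq]
          rw [show (∀ e ∈ arr1, PySem.Int.mod n e = 0) ↔ (∀ e ∈ arr1, e ∣ n) from
            forall₂_congr (fun e _ => PySem.Int.mod_eq_zero_iff_dvd n e)]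
          rw [hLpdef, forall_dvd_iff_lcm arr1 n 1]
          simp
        have h2 : ((arr2.filter (fun e => PySem.Int.mod e n == 0)).length == arr2.length) = true
            ↔ (n ∣ (Gn : Int)) := by
          simp only [beq_iff_eq, List.length_filter_eq_length_iff, beq_iff_eq]
          rw [show (∀ e ∈ arr2, PySem.Int.mod e n = 0) ↔ (∀ e ∈ arr2, n ∣ e) from
            forall₂_congr (fun e _ => PySem.Int.mod_eq_zero_iff_dvd e n)]
          rw [hGndef, dvd_forall_iff_gcd arr2 n 0]
          simp
        simp only [Bool.and_eq_true, decide_eq_true_eq]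
        rw [h1, h2]
      rw [hApred]
      -- ---- both counts equal the Nat divisor count ----
      have hAcount : (PySem.List.pyRange 1 m 1).countP
              (fun n => decide ((Lp : Int) ∣ n) && decide (n ∣ (Gn : Int)))
          = (List.range (m-1).toNat).countP
              (fun k => decide (Lp ∣ (k+1)) && decide ((k+1) ∣ Gn)) := by
        rw [PySem.List.pyRange_one, List.countP_map]
        apply List.countP_congr
        intro k _
        have hc : (1 : Int) + (k : Int) = ((k+1 : Nat) : Int) := by push_cast; ring
        simp only [Function.comp, hc, Int.natCast_dvd_natCast]
      have hBcount : (PySem.List.pyRange (Lp : Int) m (Lp : Int)).countP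
              (fun n => PySem.Int.mod (Gn : Int) n == 0)
          = (List.range ((m-1).toNat / Lp)).countP (fun k => decide (Lp * (k+1) ∣ Gn)) := by
        rw [PySem.List.pyRange_of_pos _ _ (by exact_mod_cast hLp)]
        have hN : (if (Lp : Int) < m then (((m : Int) - Lp + Lp - 1) / Lp).toNat else 0)
            = (m-1).toNat / Lp := by
          by_cases hLm : (Lp : Int) < m
          · rw [if_pos hLm]
            have he : (m : Int) - Lp + Lp - 1 = m - 1 := by ring
            rw [he, show (m : Int) - 1 = (((m-1).toNat : Nat) : Int) by omega,
              ← Int.natCast_div]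
            exact Int.toNat_natCast _
          · rw [if_neg hLm]
            symm
            apply Nat.div_eq_of_lt
            omega
          
        rw [hN, List.countP_map]
        apply List.countP_congr
        intro k _
        have hc : (Lp : Int) + (Lp : Int) * (k : Int) = ((Lp * (k+1) : Nat) : Int) := by push_cast; ring
        simp only [Function.comp_apply, Function.comp, hc]
        rw [Bool.eq_iff_iff]
        simp only [beq_iff_eq, decide_eq_true_eq, PySem.Int.mod_eq_zero_iff_dvd,
          Int.natCast_dvd_natCast]
        tauto
      rw [hAcount, hBcount, count_mult]
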